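-- pv_equiv track=rewrite | github.com/HunterTom94/BehaviorSeqMotifFinder | Encoder.py | behavior_code_gen
-- ===== SOURCE A (Python) =====
-- import math
--
-- def behavior_code_gen(behavior_ind, overlap=0):
--     if overlap:
--         temp_ls = [format(x, '07b') for x in range(int(math.pow(2, 7)))]
--         ls = [x[:behavior_ind] + '1' + x[behavior_ind:] for x in temp_ls]
--         hex_ls = [format(int(x, 2), "02X") for x in ls]
--     else:
--         temp_ls = '0000000'
--         ls = temp_ls[:behavior_ind] + '1' + temp_ls[behavior_ind:]
--         hex_ls = format(int(ls, 2), "02X")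
--     return hex_ls
-- ===== SOURCE B (Python) =====
-- def behavior_code_gen(behavior_ind, overlap=0):
--     # Build the 8-bit pattern with the flag bit once, then use bit arithmetic
--     # instead of formatting/parsing a binary string for each of the 128 values.
--     pattern = '0000000'[:behavior_ind] + '1' + '0000000'[behavior_ind:]
--     k = 7 - pattern.index('1')  # number of bits below the flag bit
--
--     def enc(v):
--         return format((v >> k << (k + 1)) | (1 << k) | (v & ((1 << k) - 1)), '02X')
--
--     if overlap:
--         return [enc(v) for v in range(128)]
--     return enc(0)
-- ===== Notes on version B (the rewrite author's own statement) =====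
-- stated objective: alternative
-- what changed: Instead of formatting each of the 128 values as a 7-bit binary string, slice-inserting '1' and reparsing with int(x,2), B builds the insertion pattern once, reads off the flag-bit position with .index('1'), and produces each code by pure bit arithmetic (shift/or/mask) before hex-formatting; Pre_ excludes overlap=0, where A returns a bare str that has no value of the declared list[str] return type (B's Python returns the same str there).
-- outside the precondition, e.g. on behavior_code_gen(3, 0): A returns '10', B returns '10'
import Mathlib
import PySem

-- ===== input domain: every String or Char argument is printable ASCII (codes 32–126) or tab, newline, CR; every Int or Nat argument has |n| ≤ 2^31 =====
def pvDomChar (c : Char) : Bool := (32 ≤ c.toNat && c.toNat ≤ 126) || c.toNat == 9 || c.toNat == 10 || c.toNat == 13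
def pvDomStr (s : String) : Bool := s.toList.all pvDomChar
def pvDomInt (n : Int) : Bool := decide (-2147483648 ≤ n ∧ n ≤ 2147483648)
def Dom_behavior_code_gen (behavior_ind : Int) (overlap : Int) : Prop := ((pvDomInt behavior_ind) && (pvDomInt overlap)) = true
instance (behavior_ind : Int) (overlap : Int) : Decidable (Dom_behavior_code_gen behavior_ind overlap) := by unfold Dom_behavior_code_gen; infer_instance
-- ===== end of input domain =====

-- B builds the flag pattern once and encodes each value by bit arithmetic instead of per-value binary-string build/slice/reparse (alternative; return value only).

-- ===== PORT A =====
-- format(n, "02X") ported by hand; exact for 0 ≤ n < 256, which covers every value both programs format here.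
def pvHexDigit (n : Nat) : Char :=
  ['0','1','2','3','4','5','6','7','8','9','A','B','C','D','E','F'].getD n '0'

def pvFmt02X (n : Int) : String :=
  String.ofList [pvHexDigit (n.toNat / 16), pvHexDigit (n.toNat % 16)]

-- format(x, '07b')
def pvBin7 (x : Int) : List Char := PySem.Chars.zfill (PySem.Int.toBinChars x) 7

def behavior_code_gen (behavior_ind : Int) (overlap : Int) : List String :=
  if overlap ≠ 0 then
    -- int(math.pow(2, 7)) = 128
    let temp_ls := (PySem.List.pyRange 0 128 1).map (fun x => pvBin7 x)
    let ls := temp_ls.map (fun x =>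
      PySem.List.slice x none (some behavior_ind) ++ ['1'] ++ PySem.List.slice x (some behavior_ind) none)
    ls.map (fun x => pvFmt02X ((PySem.Int.ofCharsBase? x 2).getD 0))
    -- int(x, 2) never raises here (nonempty '0'/'1' string); .getD 0 is unreachable
  else
    -- Python returns a bare str here, not list[str]; Pre_ excludes this branch (wrapped to fit the type)
    let temp_ls : List Char := ['0','0','0','0','0','0','0']
    let ls := PySem.List.slice temp_ls none (some behavior_ind) ++ ['1'] ++ PySem.List.slice temp_ls (some behavior_ind) none
    [pvFmt02X ((PySem.Int.ofCharsBase? ls 2).getD 0)]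

-- ===== PORT B =====
-- pattern.index('1') never raises ('1' is in the pattern); .getD 0 is unreachable
def pvEnc (k : Nat) (v : Nat) : String :=
  pvFmt02X (((v >>> k) <<< (k + 1)) ||| (1 <<< k) ||| (v &&& ((1 <<< k) - 1)) : Nat)

def behavior_code_gen_alt (behavior_ind : Int) (overlap : Int) : List String :=
  let zeros : List Char := ['0','0','0','0','0','0','0']
  let pattern := PySem.List.slice zeros none (some behavior_ind) ++ ['1'] ++ PySem.List.slice zeros (some behavior_ind) none
  let k : Nat := 7 - ((PySem.List.index? pattern '1').getD 0)
  if overlap ≠ 0 then (List.range 128).map (fun v => pvEnc k v)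
  else [pvEnc k 0]

-- ===== PRECONDITION & SPEC =====
-- Pre_ excludes overlap = 0, where Python A returns a bare str rather than a value of the declared list[str] return type (B's Python returns that same str there).
def Pre_behavior_code_gen (behavior_ind : Int) (overlap : Int) : Prop := overlap ≠ 0
instance (behavior_ind : Int) (overlap : Int) : Decidable (Pre_behavior_code_gen behavior_ind overlap) := by unfold Pre_behavior_code_gen; infer_instance
def pvWitness_behavior_code_gen : Int × Int := (3, 1)

def Spec_behavior_code_gen (behavior_ind : Int) (overlap : Int) (out : List String) : Prop := out = behavior_code_gen_alt behavior_ind overlap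
instance (behavior_ind : Int) (overlap : Int) (out : List String) : Decidable (Spec_behavior_code_gen behavior_ind overlap out) := by unfold Spec_behavior_code_gen; infer_instance

-- ===== CLAIM (what is proved, stated in full; the proofs are below) =====
def Claim_equal_behavior_code_gen : Prop := ∀ (behavior_ind : Int) (overlap : Int), Dom_behavior_code_gen behavior_ind overlap → Pre_behavior_code_gen behavior_ind overlap → Spec_behavior_code_gen behavior_ind overlap (behavior_code_gen behavior_ind overlap)

-- ===== LEMMAS AND PROOFS =====

-- slice with only an upper bound is a clamped take (companion of PySem.List.slice_some_none)
theorem pv_slice_none_some {α : Type} (xs : List α) (b : Int) :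
    PySem.List.slice xs none (some b) = xs.take (PySem.List.clampIdx xs.length b) := by
  simp [PySem.List.slice]

set_option maxRecDepth 8192 in
theorem pvBin7_len : ∀ v ∈ PySem.List.pyRange 0 128 1, (pvBin7 v).length = 7 := by decide

-- B's flag-bit position read back from the pattern is the clamped insertion position
theorem pv_index_pattern : ∀ c : Nat, c ≤ 7 →
    ((PySem.List.index?
        ((['0','0','0','0','0','0','0'] : List Char).take c ++ ['1'] ++ (['0','0','0','0','0','0','0'] : List Char).drop c)
        '1').getD 0) = c := by
  decide

-- the two overlap-branch list builds agree for every clamped position c ≤ 7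
theorem pv_branch_eq : ∀ c : Nat, c ≤ 7 →
    (((PySem.List.pyRange 0 128 1).map (fun x => pvBin7 x)).map
        (fun x => x.take c ++ ['1'] ++ x.drop c)).map
      (fun x => pvFmt02X ((PySem.Int.ofCharsBase? x 2).getD 0))
    = (List.range 128).map (fun v => pvEnc (7 - c) v) := by
  intro c hc
  interval_cases c <;> (set_option maxRecDepth 100000 in decide)

theorem behavior_code_gen_spec : Claim_equal_behavior_code_gen := by
  intro bi ov _ hpre
  have hov : ov ≠ 0 := hpre
  unfold Spec_behavior_code_gen behavior_code_gen behavior_code_gen_alt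
  rw [if_pos hov, if_pos hov]
  set c : Nat := PySem.List.clampIdx 7 bi with hcdef
  have hc : c ≤ 7 := by simp only [hcdef, PySem.List.clampIdx]; split_ifs <;> omega
  have hsl : PySem.List.slice (['0','0','0','0','0','0','0'] : List Char) none (some bi) ++ ['1'] ++
      PySem.List.slice (['0','0','0','0','0','0','0'] : List Char) (some bi) none
      = (['0','0','0','0','0','0','0'] : List Char).take c ++ ['1'] ++ (['0','0','0','0','0','0','0'] : List Char).drop c := by
    rw [pv_slice_none_some, PySem.List.slice_some_none]
    norm_num [← hcdef]
  have hmap : ((PySem.List.pyRange 0 128 1).map (fun x => pvBin7 x)).map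
      (fun x => PySem.List.slice x none (some bi) ++ ['1'] ++ PySem.List.slice x (some bi) none)
      = ((PySem.List.pyRange 0 128 1).map (fun x => pvBin7 x)).map
      (fun x => x.take c ++ ['1'] ++ x.drop c) := by
    apply List.map_congr_left
    intro x hx
    obtain ⟨v, hv, rfl⟩ := List.mem_map.mp hx
    have hlen : (pvBin7 v).length = 7 := pvBin7_len v hv
    rw [pv_slice_none_some, PySem.List.slice_some_none, hlen, hcdef]
  simp only [hmap, hsl, pv_index_pattern c hc]
  exact pv_branch_eq c hc
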